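-- pv_equiv track=rewrite | github.com/2SOOY/problem-solving | boj_센서.py | solution
-- ===== SOURCE A (Python) =====
-- def solution(N, K, sensors):
--     # 1. 센서 < 집중국 => 모든 구간 커버 가능 ** 주의
--     if N <= K:
--         return 0
--
--     # 2. 센서 > 집중국
--     sensors.sort() # 센서 좌표들 정렬 => 인접 센서들의 거리 차를 구하기 위함
--     diff_sensors = []
--
--     for idx in range(1, N):
--         dist = sensors[idx] - sensors[idx - 1]
--         diff_sensors.append(dist)
--
--     # 거리 차가 많이 나는 부분부터 구간을 선택하면 된다.
--     diff_sensors.sort()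
--
--     loop = K - 1
--     while loop != 0:
--         diff_sensors.pop()
--         loop -= 1
--
--     return sum(diff_sensors)
-- ===== SOURCE B (Python) =====
-- def solution(N, K, sensors):
--     if N <= K:
--         return 0
--     sensors.sort()
--     gaps = [b - a for a, b in zip(sensors, sensors[1:N])]
--     # partial selection: remove the largest gap K-1 times (no sorting of gaps)
--     for _ in range(K - 1):
--         gaps.remove(max(gaps))
--     return sum(gaps)
-- ===== Notes on version B (the rewrite author's own statement) =====
-- stated objective: alternative
-- what changed: B never sorts the gap list: instead of A's sort-then-pop, it does K-1 rounds of linear max-selection (gaps.remove(max(gaps))) and sums what is left, computing the gaps by zipping the sorted sensors with their shifted tail rather than by an index loop.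
import Mathlib
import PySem

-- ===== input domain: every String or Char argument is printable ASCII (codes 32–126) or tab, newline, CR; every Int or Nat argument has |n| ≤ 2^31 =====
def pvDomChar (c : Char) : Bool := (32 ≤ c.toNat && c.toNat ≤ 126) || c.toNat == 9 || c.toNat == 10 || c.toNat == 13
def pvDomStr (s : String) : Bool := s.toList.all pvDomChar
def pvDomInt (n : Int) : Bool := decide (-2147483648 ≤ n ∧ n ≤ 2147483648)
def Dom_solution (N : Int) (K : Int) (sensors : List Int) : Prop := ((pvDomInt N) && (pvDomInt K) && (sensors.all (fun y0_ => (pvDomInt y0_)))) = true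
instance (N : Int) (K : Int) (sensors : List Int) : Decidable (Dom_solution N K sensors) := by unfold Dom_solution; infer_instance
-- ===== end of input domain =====

-- B replaces A's sort-the-gaps-then-pop procedure by K-1 rounds of linear max-selection
-- (remove the currently largest gap, no sorting of the gap list) and sums the remainder.
-- Both Pythons sort `sensors` in place; the equivalence proved here is about the return value.

-- ===== PORT A =====
def solution (N : Int) (K : Int) (sensors : List Int) : Int :=
  if N ≤ K then 0
  else
    let s := PySem.List.sorted sensors (fun x => x) false   -- sensors.sort()
    -- for idx in range(1, N): diff_sensors.append(sensors[idx] - sensors[idx-1])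
    -- (indices are in range on Pre_, so pyGetD with default 0 is exact there)
    let diffs := (PySem.List.pyRange 1 N 1).foldl
      (fun acc idx => acc ++ [PySem.List.pyGetD s idx 0 - PySem.List.pyGetD s (idx - 1) 0]) []
    let ds := PySem.List.sorted diffs (fun x => x) false    -- diff_sensors.sort()
    -- while loop != 0: diff_sensors.pop(); loop -= 1   — K-1 pops of the last element
    -- (on Pre_, K ≥ 1 and the list stays nonempty, so pop() = dropLast, K-1 times)
    let rest := (List.range (K - 1).toNat).foldl (fun l _ => l.dropLast) ds
    rest.sum

-- ===== PORT B =====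
def solution_alt (N : Int) (K : Int) (sensors : List Int) : Int :=
  if N ≤ K then 0
  else
    let s := PySem.List.sorted sensors (fun x => x) false   -- sensors.sort()
    -- gaps = [b - a for a, b in zip(sensors, sensors[1:N])]
    let gaps := (s.zip (PySem.List.slice s (some 1) (some N))).map (fun p => p.2 - p.1)
    -- for _ in range(K - 1): gaps.remove(max(gaps))
    -- (on Pre_ the list is nonempty at every round, so the none branches never fire)
    let final := (List.range (K - 1).toNat).foldl
      (fun g _ =>
        match PySem.List.max? g (fun x => x) with
        | some m => (PySem.List.remove? g m).getD g
        | none => g) gaps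
    final.sum

-- ===== PRECONDITION & SPEC =====
-- Pre_ excludes exactly the inputs where A raises: with N > K, A raises IndexError when
-- N exceeds len(sensors), and loops popping forever (IndexError on empty pop) when K < 1.
def Pre_solution (N : Int) (K : Int) (sensors : List Int) : Prop :=
  N ≤ K ∨ (1 ≤ K ∧ N ≤ (sensors.length : Int))
instance (N : Int) (K : Int) (sensors : List Int) : Decidable (Pre_solution N K sensors) := by
  unfold Pre_solution; infer_instance
def pvWitness_solution : Int × Int × List Int := (3, 1, [1, 9, 6])
def Spec_solution (N : Int) (K : Int) (sensors : List Int) (out : Int) : Prop := out = solution_alt N K sensors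
instance (N : Int) (K : Int) (sensors : List Int) (out : Int) : Decidable (Spec_solution N K sensors out) := by unfold Spec_solution; infer_instance

-- ===== CLAIM (what is proved, stated in full; the proofs are below) =====
def Claim_equal_solution : Prop := ∀ (N : Int) (K : Int) (sensors : List Int), Dom_solution N K sensors → Pre_solution N K sensors → Spec_solution N K sensors (solution N K sensors)

-- ===== LEMMAS AND PROOFS =====

-- K-1 pops of the last element = take (length - (K-1))
lemma iterate_dropLast (m : Nat) (xs : List Int) :
    (List.range m).foldl (fun l _ => l.dropLast) xs = xs.take (xs.length - m) := by
  induction m with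
  | zero => simp
  | succ m ih =>
      rw [List.range_succ, List.foldl_append, ih]
      simp only [List.foldl_cons, List.foldl_nil, List.dropLast_eq_take, List.take_take,
        List.length_take]
      congr 1
      omega

-- one round of B's loop, applied to a rearrangement of the first m elements of the
-- sorted gap list, yields a rearrangement of the first m-1 elements
lemma remove_max_step (L : List Int) (hL : L = PySem.List.sorted L (fun x => x) false)
    (m : Nat) (hm1 : 1 ≤ m) (hm : m ≤ L.length) (g : List Int) (hg : g.Perm (L.take m)) :
    (match PySem.List.max? g (fun x => x) with
      | some v => (PySem.List.remove? g v).getD g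
      | none => g).Perm (L.take (m - 1)) := by
  have hglen : g.length = m := by rw [hg.length_eq, List.length_take]; omega
  have hgne : g ≠ [] := by intro h; rw [h] at hglen; simp at hglen; omega
  obtain ⟨v, hv⟩ : ∃ v, PySem.List.max? g (fun x => x) = some v := by
    cases h : PySem.List.max? g (fun x => x) with
    | none => exact absurd ((PySem.List.max?_eq_none_iff g (fun x => x)).mp h) hgne
    | some v => exact ⟨v, rfl⟩
  have hvmem : v ∈ g := PySem.List.max?_mem hv
  have hvmax : ∀ y ∈ g, y ≤ v := PySem.List.max?_isMax hv
  -- the max of the first m elements of the sorted list is its (m-1)-st element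
  have hlast : L[m - 1]'(by omega) = v := by
    have h1 : v ≤ L[m - 1]'(by omega) := by
      have hvL : v ∈ L.take m := hg.mem_iff.mp hvmem
      obtain ⟨i, hi, hiv⟩ := List.getElem_of_mem hvL
      rw [List.getElem_take] at hiv
      rw [← hiv]
      have := PySem.List.key_sorted_getElem_mono (xs := L) (key := fun x => x)
        (p := i) (q := m - 1) (by simp at hi; omega) (by rw [← hL]; omega)
      simpa [← hL] using this
    have h2 : L[m - 1]'(by omega) ≤ v := by
      apply hvmax
      apply hg.mem_iff.mpr
      have : L[m - 1]'(by omega) ∈ L.take m := by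
        apply List.mem_take_iff_getElem.mpr
        exact ⟨m - 1, by simp; omega, rfl⟩
      exact this
    omega
  rw [hv]
  change ((PySem.List.remove? g v).getD g).Perm (L.take (m - 1))
  rw [PySem.List.remove?_eq_some_erase g v hvmem, Option.getD_some]
  refine (hg.erase v).trans ?_
  have hsplit : L.take m = L.take (m - 1) ++ [v] := by
    rw [← hlast]
    obtain ⟨j, rfl⟩ : ∃ j, m = j + 1 := ⟨m - 1, by omega⟩
    simp only [Nat.add_sub_cancel]
    rw [List.take_succ, List.getElem?_eq_getElem (by omega)]
    simp
  rw [hsplit]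
  have h1 : ((L.take (m - 1) ++ [v]).erase v).Perm ((v :: L.take (m - 1)).erase v) :=
    (List.perm_append_singleton v (L.take (m - 1))).erase v
  rw [List.erase_cons_head v _] at h1
  exact h1

-- r rounds of B's loop leave a rearrangement of the first (length - r) sorted gaps
lemma remove_max_iter (L : List Int) (hL : L = PySem.List.sorted L (fun x => x) false)
    (G : List Int) (hG : G.Perm L) (r : Nat) (hr : r ≤ L.length) :
    ((List.range r).foldl
      (fun g _ =>
        match PySem.List.max? g (fun x => x) with
        | some v => (PySem.List.remove? g v).getD g
        | none => g) G).Perm (L.take (L.length - r)) := by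
  induction r with
  | zero => simpa using hG
  | succ r ih =>
      rw [List.range_succ, List.foldl_append, List.foldl_cons, List.foldl_nil]
      have hstep := remove_max_step L hL (L.length - r) (by omega) (by omega) _
        (ih (by omega))
      have : L.length - r - 1 = L.length - (r + 1) := by omega
      rwa [this] at hstep

-- ===== VERDICT (by name: the statement is the Claim_ definition above) =====

theorem solution_spec : Claim_equal_solution := by
  intro N K sensors _hdom hpre
  unfold Spec_solution solution solution_alt
  by_cases hNK : N ≤ K
  · simp [hNK]
  · simp only [if_neg hNK]
    rcases hpre with h | ⟨hK1, hNlen⟩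
    · exact absurd h hNK
    replace hNK : K < N := by omega
    set s := PySem.List.sorted sensors (fun x => x) false with hs
    have hslen : s.length = sensors.length := PySem.List.length_sorted ..
    obtain ⟨n, hn⟩ : ∃ n : Nat, N = (n : Int) := ⟨N.toNat, by omega⟩
    obtain ⟨k, hk⟩ : ∃ k : Nat, K = (k : Int) := ⟨K.toNat, by omega⟩
    subst hn hk
    have hkn : 1 ≤ k ∧ k < n ∧ n ≤ s.length := ⟨by omega, by omega, by omega⟩
    -- A's diff list equals B's gap list
    have hdiffs :
        ((PySem.List.pyRange 1 (n : Int) 1).foldl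
          (fun acc idx => acc ++ [PySem.List.pyGetD s idx 0 - PySem.List.pyGetD s (idx - 1) 0]) [])
        = (s.zip (PySem.List.slice s (some 1) (some (n : Int)))).map (fun p : Int × Int => p.2 - p.1) := by
      rw [PySem.List.foldl_append_singleton_eq_map, List.nil_append, PySem.List.pyRange_one,
        show (some (1 : Int)) = (some ((1 : Nat) : Int)) by norm_num,
        PySem.List.slice_natCast s 1 n]
      apply List.ext_getElem
      · simp [List.length_zip]; omega
      · intro i h1 h2
        simp only [List.getElem_map, List.getElem_range, List.getElem_zip, List.getElem_take,
          List.getElem_drop]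
        have hi : i < n - 1 := by simp [List.length_zip] at h2 ⊢; omega
        have e1 : (1 : Int) + (i : Int) = ((i + 1 : Nat) : Int) := by push_cast; ring
        have e2' : ((i + 1 : Nat) : Int) - 1 = ((i : Nat) : Int) := by omega
        rw [e1, e2', PySem.List.pyGetD_natCast, PySem.List.pyGetD_natCast]
        rw [List.getD_eq_getElem s 0 (by omega), List.getD_eq_getElem s 0 (by omega)]
        simp [Nat.add_comm]
    set G := (s.zip (PySem.List.slice s (some 1) (some (n : Int)))).map
      (fun p : Int × Int => p.2 - p.1) with hGdef
    have hGlen : G.length = n - 1 := by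
      rw [hGdef, show (some (1 : Int)) = (some ((1 : Nat) : Int)) by norm_num,
        PySem.List.slice_natCast s 1 n]
      simp [List.length_zip]; omega
    set L := PySem.List.sorted G (fun x => x) false with hLdef
    have hLlen : L.length = n - 1 := by rw [hLdef, PySem.List.length_sorted]; exact hGlen
    have hLsorted : L = PySem.List.sorted L (fun x => x) false :=
      (PySem.List.sorted_sorted ..).symm
    have hGL : G.Perm L := (PySem.List.sorted_perm ..).symm
    -- A's value: (K-1) pops of the sorted diff list
    rw [hdiffs, ← hLdef, iterate_dropLast, hLlen]
    -- B's value: (K-1) rounds of max-removal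
    have hB := remove_max_iter L hLsorted G hGL ((k : Int) - 1).toNat (by omega)
    rw [hB.sum_eq, hLlen]
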